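-- pv_equiv track=rewrite | github.com/0pmm/Python-Coursera-USP | study ones/nim.py | computador_escolhe_jogada
-- ===== SOURCE A (Python) =====
-- def computador_escolhe_jogada(n,m):
--     PcR = 1
--     while PcR != m:
--         if (n - PcR) % (m+1) == 0:
--             return PcR
--         else:
--             PcR += 1
--
--     return PcR
-- ===== SOURCE B (Python) =====
-- def computador_escolhe_jogada(n, m):
--     r = n % (m + 1)
--     return r if 1 <= r <= m else m
-- ===== Notes on version B (the rewrite author's own statement) =====
-- stated objective: faster
-- what changed: Replaces the linear scan of candidate moves 1..m by one modulo computation r = n % (m+1), returning r when 1 <= r <= m and m otherwise.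
-- outside the precondition, e.g. on computador_escolhe_jogada(5, 0): A returns 1, B returns 0; on computador_escolhe_jogada(5, -1): A raises ZeroDivisionError, B raises ZeroDivisionError; on computador_escolhe_jogada(5, -3): A returns 1, B returns -3
import Mathlib
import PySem

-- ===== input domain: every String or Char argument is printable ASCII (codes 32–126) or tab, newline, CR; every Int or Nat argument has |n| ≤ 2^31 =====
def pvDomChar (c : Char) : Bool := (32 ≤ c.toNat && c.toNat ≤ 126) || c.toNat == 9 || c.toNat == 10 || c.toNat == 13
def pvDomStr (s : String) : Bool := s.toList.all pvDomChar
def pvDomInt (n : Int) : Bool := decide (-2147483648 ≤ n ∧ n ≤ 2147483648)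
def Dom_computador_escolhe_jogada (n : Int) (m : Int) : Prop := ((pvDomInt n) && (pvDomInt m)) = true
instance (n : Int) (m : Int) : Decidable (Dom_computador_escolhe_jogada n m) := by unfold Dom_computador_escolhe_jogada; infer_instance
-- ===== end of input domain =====

-- ===== PORT A =====
-- B replaces A's linear scan of moves 1..m by a single modulo computation (objective: faster).
-- Loop of A: PcR counts up from 1 while PcR != m; fuel m.natAbs + 1 bounds the iterations
-- (for m ≥ 1 the loop exits within m-1 steps; for m ≤ 0 a divisible PcR is hit within |m+1| steps).
def pvALoop (n : Int) (m : Int) (PcR : Int) : Nat → Int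
  | 0 => PcR
  | fuel + 1 =>
    if PcR = m then PcR
    else if PySem.Int.mod (n - PcR) (m + 1) = 0 then PcR
    else pvALoop n m (PcR + 1) fuel

def computador_escolhe_jogada (n : Int) (m : Int) : Int :=
  pvALoop n m 1 (m.natAbs + 1)

-- ===== PORT B =====
def computador_escolhe_jogada_alt (n : Int) (m : Int) : Int :=
  let r := PySem.Int.mod n (m + 1)
  if 1 ≤ r ∧ r ≤ m then r else m

-- ===== PRECONDITION & SPEC =====
-- Pre_ restricts to Nim's natural domain m ≥ 1 (at least one stick may be removed): A raises
-- ZeroDivisionError at m = -1, and for other m ≤ 0 its returned value is an accident of the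
-- scan starting at PcR = 1, which B does not reproduce.
def Pre_computador_escolhe_jogada (n : Int) (m : Int) : Prop := 1 ≤ m
instance (n : Int) (m : Int) : Decidable (Pre_computador_escolhe_jogada n m) := by
  unfold Pre_computador_escolhe_jogada; infer_instance
def pvWitness_computador_escolhe_jogada : Int × Int := (5, 3)

def Spec_computador_escolhe_jogada (n : Int) (m : Int) (out : Int) : Prop :=
  out = computador_escolhe_jogada_alt n m
instance (n : Int) (m : Int) (out : Int) : Decidable (Spec_computador_escolhe_jogada n m out) := by
  unfold Spec_computador_escolhe_jogada; infer_instance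

-- ===== CLAIM (what is proved, stated in full; the proofs are below) =====
def Claim_equal_computador_escolhe_jogada : Prop :=
  ∀ (n : Int) (m : Int), Dom_computador_escolhe_jogada n m →
    Pre_computador_escolhe_jogada n m →
    Spec_computador_escolhe_jogada n m (computador_escolhe_jogada n m)

-- ===== LEMMAS AND PROOFS =====

-- A's loop, for PcR ∈ [1, m] with enough fuel, returns the residue r = n % (m+1) if it lies in
-- [PcR, m-1], and m otherwise.
theorem pvALoop_eq (n m : Int) (hm : 1 ≤ m) :
    ∀ (fuel : Nat) (PcR : Int), 1 ≤ PcR → PcR ≤ m → (m - PcR).toNat ≤ fuel →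
      pvALoop n m PcR fuel =
        if PcR ≤ PySem.Int.mod n (m + 1) ∧ PySem.Int.mod n (m + 1) ≤ m - 1
        then PySem.Int.mod n (m + 1) else m := by
  intro fuel
  induction fuel with
  | zero =>
    intro PcR h1 h2 hf
    have : PcR = m := by omega
    subst this
    simp only [pvALoop]
    split_ifs <;> omega
  | succ f ih =>
    intro PcR h1 h2 hf
    have hpos : (0:Int) < m + 1 := by omega
    have hr := PySem.Int.mod_eq_emod_of_pos (a := n) (b := m+1) hpos
    by_cases hPm : PcR = m
    · subst hPm
      simp only [pvALoop, if_true]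
      split_ifs <;> omega
    · have hlt : PcR < m := lt_of_le_of_ne h2 hPm
      have hdvd : PySem.Int.mod (n - PcR) (m + 1) = 0 ↔ (m + 1) ∣ (n - PcR) :=
        PySem.Int.mod_eq_zero_iff_dvd _ _
      have hcond : (m + 1) ∣ (n - PcR) ↔ PySem.Int.mod n (m + 1) = PcR := by
        rw [hr]
        constructor
        · intro h
          have : PcR ≡ n [ZMOD (m+1)] := (Int.modEq_iff_dvd).2 h
          have h2' : n % (m + 1) = PcR % (m + 1) := this.symm
          rw [h2', Int.emod_eq_of_lt (by omega) (by omega)]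
        · intro h
          have : n % (m + 1) = PcR % (m + 1) := by
            rw [h, Int.emod_eq_of_lt (by omega) (by omega)]
          exact (Int.modEq_iff_dvd).1 (by exact this.symm)
      by_cases hc : PySem.Int.mod (n - PcR) (m + 1) = 0
      · have hrP : PySem.Int.mod n (m + 1) = PcR := hcond.1 (hdvd.1 hc)
        simp [pvALoop, hPm, hc, hrP]
        omega
      · have hrP : PySem.Int.mod n (m + 1) ≠ PcR := fun h => hc (hdvd.2 (hcond.2 h))
        have hrec := ih (PcR + 1) (by omega) (by omega) (by omega)
        simp only [pvALoop, if_neg hPm, if_neg hc, hrec]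
        congr 1
        simp only [eq_iff_iff]
        constructor <;> intro h <;> exact ⟨by omega, h.2⟩

-- ===== VERDICT (by name: the statement is the Claim_ definition above) =====
theorem computador_escolhe_jogada_spec : Claim_equal_computador_escolhe_jogada := by
  intro n m _ hmP
  have hm : 1 ≤ m := hmP
  unfold Spec_computador_escolhe_jogada computador_escolhe_jogada
  have halt : computador_escolhe_jogada_alt n m =
      if 1 ≤ PySem.Int.mod n (m+1) ∧ PySem.Int.mod n (m+1) ≤ m
      then PySem.Int.mod n (m+1) else m := rfl
  rw [halt]
  have hpos : (0:Int) < m + 1 := by omega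
  have hr0 : 0 ≤ PySem.Int.mod n (m + 1) := PySem.Int.mod_nonneg (a := n) (b := m+1) hpos
  have hrlt : PySem.Int.mod n (m + 1) < m + 1 := PySem.Int.mod_lt (a := n) (b := m+1) hpos
  rw [pvALoop_eq n m hm (m.natAbs + 1) 1 le_rfl hm (by omega)]
  by_cases h : PySem.Int.mod n (m + 1) = m
  · simp only [h]
    split_ifs <;> omega
  · split_ifs <;> omega
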